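-- pv_equiv track=rewrite | github.com/strellic/rhythm-cons | strellpad-2/code/screen.py | key_to_char_index
-- ===== SOURCE A (Python) =====
-- alphabet = [c for c in "ABCDEFGHIJKLMNOPQRSTUVWXYZ"] + [
--     "ZERO", "ONE", "TWO", "THREE", "FOUR", "FIVE", "SIX", "SEVEN", "EIGHT", "NINE",
--     "SPACE", "ENTER", "ESCAPE", "UP_ARROW", "LEFT_ARROW", "RIGHT_ARROW", "DOWN_ARROW",
--     "SHIFT", "RIGHT_SHIFT", "DELETE", "CTRL", "RIGHT_CTRL", "ALT", "RIGHT_ALT", "PRINT_SCRN",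
--
--     # consumer control codes
--     "BRIGHT_DEC", "BRIGHT_INC", "PLAY_PAUSE", "STOP", "MUTE", "PREV_TRACK", "NEXT_TRACK",
--     "VOLUME_DEC", "VOLUME_INC"
-- ]
--
-- def key_to_char_index(key):
--     try:
--         return alphabet.index(key)
--     except:
--         for i in range(len(alphabet)):
--             if key == fixup_key_name(alphabet[i]):
--                 return i
--         return 0
--
-- def fixup_key_name(key):
--     key = key.replace("DEC", "DECREMENT")
--     key = key.replace("INC", "INCREMENT")
--     key = key.replace("PREV", "PREVIOUS")
--     key = key.replace("CTRL", "CONTROL")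
--     key = key.replace("SCRN", "SCREEN")
--     key = key.replace("BRIGHTNESS", "BRIGHT")
--     if key == "NEXT_TRACK" or key == "PREVIOUS_TRACK":
--         key = "SCAN_" + key
--     return key
-- ===== SOURCE B (Python) =====
-- # Letters A-Z are computed arithmetically from the character code; every
-- # multi-character key (canonical name or its spelled-out alias) is one flat
-- # literal table, so there is no alphabet list, no fixup normalisation and no
-- # scanning at run time.
--
-- _names = {
--     "ZERO": 26, "ONE": 27, "TWO": 28, "THREE": 29, "FOUR": 30, "FIVE": 31,
--     "SIX": 32, "SEVEN": 33, "EIGHT": 34, "NINE": 35,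
--     "SPACE": 36, "ENTER": 37, "ESCAPE": 38,
--     "UP_ARROW": 39, "LEFT_ARROW": 40, "RIGHT_ARROW": 41, "DOWN_ARROW": 42,
--     "SHIFT": 43, "RIGHT_SHIFT": 44, "DELETE": 45,
--     "CTRL": 46, "CONTROL": 46,
--     "RIGHT_CTRL": 47, "RIGHT_CONTROL": 47,
--     "ALT": 48, "RIGHT_ALT": 49,
--     "PRINT_SCRN": 50, "PRINT_SCREEN": 50,
--     "BRIGHT_DEC": 51, "BRIGHT_DECREMENT": 51,
--     "BRIGHT_INC": 52, "BRIGHT_INCREMENT": 52,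
--     "PLAY_PAUSE": 53, "STOP": 54, "MUTE": 55,
--     "PREV_TRACK": 56, "SCAN_PREVIOUS_TRACK": 56,
--     "NEXT_TRACK": 57, "SCAN_NEXT_TRACK": 57,
--     "VOLUME_DEC": 58, "VOLUME_DECREMENT": 58,
--     "VOLUME_INC": 59, "VOLUME_INCREMENT": 59,
-- }
--
-- def key_to_char_index(key):
--     if isinstance(key, str):
--         if len(key) == 1 and 'A' <= key <= 'Z':
--             return ord(key) - ord('A')
--         return _names.get(key, 0)
--     return 0
-- ===== Notes on version B (the rewrite author's own statement) =====
-- stated objective: simpler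
-- what changed: Replaces the try/except .index scan plus the fallback loop that fixup-normalizes every alphabet entry by a closed-form computation: a single uppercase letter is computed arithmetically from its character code, and every multi-character name (canonical or spelled-out alias) is one flat literal table lookup, eliminating the alphabet list, the fixup_key_name helper and all scanning.
import Mathlib
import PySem

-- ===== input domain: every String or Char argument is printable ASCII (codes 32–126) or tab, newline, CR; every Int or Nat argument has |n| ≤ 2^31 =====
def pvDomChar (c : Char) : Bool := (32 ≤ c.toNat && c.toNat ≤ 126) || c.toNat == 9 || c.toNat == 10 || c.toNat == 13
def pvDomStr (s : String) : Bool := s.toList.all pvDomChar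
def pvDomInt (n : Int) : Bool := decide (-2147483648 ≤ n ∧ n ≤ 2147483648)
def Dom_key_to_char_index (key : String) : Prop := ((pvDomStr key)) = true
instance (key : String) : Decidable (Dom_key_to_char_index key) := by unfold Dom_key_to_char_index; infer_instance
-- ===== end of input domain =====

-- B replaces A's try/except .index scan and fallback fixup loop by arithmetic on
-- the character code for single letters plus one flat literal alias table for the
-- multi-character names; objective: simpler (no alphabet list, no fixup, no scan).

-- module-level constant of A
def alphabet : List String :=
  ["A","B","C","D","E","F","G","H","I","J","K","L","M","N","O","P","Q","R","S","T","U","V","W","X","Y","Z",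
   "ZERO","ONE","TWO","THREE","FOUR","FIVE","SIX","SEVEN","EIGHT","NINE",
   "SPACE","ENTER","ESCAPE","UP_ARROW","LEFT_ARROW","RIGHT_ARROW","DOWN_ARROW",
   "SHIFT","RIGHT_SHIFT","DELETE","CTRL","RIGHT_CTRL","ALT","RIGHT_ALT","PRINT_SCRN",
   "BRIGHT_DEC","BRIGHT_INC","PLAY_PAUSE","STOP","MUTE","PREV_TRACK","NEXT_TRACK",
   "VOLUME_DEC","VOLUME_INC"]

-- module-level helper fixup_key_name of A
def fixup_key_name (key : String) : String :=
  let key := PySem.Str.replace key "DEC" "DECREMENT"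
  let key := PySem.Str.replace key "INC" "INCREMENT"
  let key := PySem.Str.replace key "PREV" "PREVIOUS"
  let key := PySem.Str.replace key "CTRL" "CONTROL"
  let key := PySem.Str.replace key "SCRN" "SCREEN"
  let key := PySem.Str.replace key "BRIGHTNESS" "BRIGHT"
  if key = "NEXT_TRACK" ∨ key = "PREVIOUS_TRACK" then "SCAN_" ++ key else key

-- ===== PORT A =====
def key_to_char_index (key : String) : Int :=
  match PySem.List.index? alphabet key with
  | some i => (i : Int)
  | none =>
    match (PySem.List.pyRange 0 (alphabet.length : Int) 1).find?
        (fun i => key == fixup_key_name (PySem.List.pyGetD alphabet i "")) with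
    | some i => i
    | none => 0

-- ===== PORT B =====
-- the flat literal table _names of Source B (a Python dict literal with distinct keys)
def pvNames : PySem.Dict String Int := PySem.Dict.mk
  [("ZERO", 26), ("ONE", 27), ("TWO", 28), ("THREE", 29), ("FOUR", 30), ("FIVE", 31),
   ("SIX", 32), ("SEVEN", 33), ("EIGHT", 34), ("NINE", 35),
   ("SPACE", 36), ("ENTER", 37), ("ESCAPE", 38),
   ("UP_ARROW", 39), ("LEFT_ARROW", 40), ("RIGHT_ARROW", 41), ("DOWN_ARROW", 42),
   ("SHIFT", 43), ("RIGHT_SHIFT", 44), ("DELETE", 45),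
   ("CTRL", 46), ("CONTROL", 46),
   ("RIGHT_CTRL", 47), ("RIGHT_CONTROL", 47),
   ("ALT", 48), ("RIGHT_ALT", 49),
   ("PRINT_SCRN", 50), ("PRINT_SCREEN", 50),
   ("BRIGHT_DEC", 51), ("BRIGHT_DECREMENT", 51),
   ("BRIGHT_INC", 52), ("BRIGHT_INCREMENT", 52),
   ("PLAY_PAUSE", 53), ("STOP", 54), ("MUTE", 55),
   ("PREV_TRACK", 56), ("SCAN_PREVIOUS_TRACK", 56),
   ("NEXT_TRACK", 57), ("SCAN_NEXT_TRACK", 57),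
   ("VOLUME_DEC", 58), ("VOLUME_DECREMENT", 58),
   ("VOLUME_INC", 59), ("VOLUME_INCREMENT", 59)]

-- Python's "len(key) == 1 and 'A' <= key <= 'Z'" compares the one-character string
-- lexicographically, which for single characters is exactly the character-code
-- comparison ported here; ord(key) - ord('A') is c.toNat - 65.
def key_to_char_index_alt (key : String) : Int :=
  match key.toList with
  | [c] => if 'A' ≤ c ∧ c ≤ 'Z' then (c.toNat : Int) - 65 else pvNames.getD key 0
  | _ => pvNames.getD key 0

-- ===== PRECONDITION & SPEC =====
def Spec_key_to_char_index (key : String) (out : Int) : Prop := out = key_to_char_index_alt key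
instance (key : String) (out : Int) : Decidable (Spec_key_to_char_index key out) := by unfold Spec_key_to_char_index; infer_instance

-- ===== CLAIM (what is proved, stated in full; the proofs are below) =====
def Claim_equal_key_to_char_index : Prop := ∀ (key : String), Dom_key_to_char_index key → Spec_key_to_char_index key (key_to_char_index key)

-- ===== LEMMAS AND PROOFS =====

-- every string either of the two programs can ever match against
def pvAllKeys : List String := alphabet ++ alphabet.map fixup_key_name

set_option maxRecDepth 10000 in
set_option maxHeartbeats 1000000 in
theorem pvAllKeys_check :
    pvAllKeys.all (fun k => key_to_char_index k == key_to_char_index_alt k) = true := by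
  decide

theorem pv_mem_range_getD (i : Int)
    (hi : i ∈ PySem.List.pyRange 0 (alphabet.length : Int) 1) :
    PySem.List.pyGetD alphabet i "" ∈ alphabet := by
  rw [PySem.List.mem_pyRange_one] at hi
  obtain ⟨h0, h1⟩ := hi
  have : i = ((i.toNat : Nat) : Int) := by omega
  rw [this, PySem.List.pyGetD_natCast]
  have hlt : i.toNat < alphabet.length := by
    have : (alphabet.length : Int) = 60 := by decide
    omega
  rw [List.getD_eq_getElem _ _ hlt]
  exact List.getElem_mem hlt

theorem pv_notin_A (key : String) (h : key ∉ pvAllKeys) : key_to_char_index key = 0 := by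
  have hna : key ∉ alphabet := fun hm => h (List.mem_append_left _ hm)
  unfold key_to_char_index
  rw [PySem.List.index?_eq_idxOf?, List.idxOf?_eq_none_iff.mpr hna]
  have hfind : (PySem.List.pyRange 0 (alphabet.length : Int) 1).find?
      (fun i => key == fixup_key_name (PySem.List.pyGetD alphabet i "")) = none := by
    rw [List.find?_eq_none]
    intro i hi
    have : fixup_key_name (PySem.List.pyGetD alphabet i "") ∈ alphabet.map fixup_key_name :=
      List.mem_map_of_mem (pv_mem_range_getD i hi)
    have hne : key ≠ fixup_key_name (PySem.List.pyGetD alphabet i "") :=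
      fun he => h (List.mem_append_right _ (he ▸ this))
    simpa using hne
  rw [hfind]

-- every key of the literal table occurs in pvAllKeys
set_option maxRecDepth 10000 in
theorem pv_names_sub : ∀ k ∈ pvNames.keys, k ∈ pvAllKeys := by decide

-- each single uppercase letter string is an alphabet entry
theorem pv_letter_mem : ∀ n ∈ List.range' 65 26, String.ofList [Char.ofNat n] ∈ alphabet := by
  decide

theorem pv_getD_zero (key : String) (h : key ∉ pvAllKeys) : pvNames.getD key 0 = 0 := by
  have hk : key ∉ pvNames.keys := fun hm => h (pv_names_sub key hm)
  rw [PySem.Dict.getD_eq_get?_getD, (PySem.Dict.get?_eq_none_iff_not_mem_keys _ _).mpr hk]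
  rfl

theorem pv_notin_B (key : String) (h : key ∉ pvAllKeys) : key_to_char_index_alt key = 0 := by
  unfold key_to_char_index_alt
  cases htl : key.toList with
  | nil => exact pv_getD_zero key h
  | cons c cs =>
    cases cs with
    | cons d ds => exact pv_getD_zero key h
    | nil =>
      by_cases hc : 'A' ≤ c ∧ c ≤ 'Z'
      · exfalso
        obtain ⟨h1, h2⟩ := hc
        simp [Char.le_def, UInt32.le_iff_toNat_le] at h1 h2
        have hkey : key = String.ofList [Char.ofNat c.toNat] := by
          rw [Char.ofNat_toNat, ← htl, String.ofList_toList]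
        have hmem : String.ofList [Char.ofNat c.toNat] ∈ alphabet := by
          apply pv_letter_mem
          rw [List.mem_range']
          exact ⟨c.toNat - 65, by omega, by omega⟩
        exact h (List.mem_append_left _ (hkey ▸ hmem))
      · simp only [if_neg hc]
        exact pv_getD_zero key h

-- ===== VERDICT (by name: the statement is the Claim_ definition above) =====
theorem key_to_char_index_spec : Claim_equal_key_to_char_index := by
  intro key _
  unfold Spec_key_to_char_index
  by_cases h : key ∈ pvAllKeys
  · exact eq_of_beq (List.all_eq_true.mp pvAllKeys_check key h)
  · rw [pv_notin_A key h, pv_notin_B key h]
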